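-- pv_equiv track=rewrite | github.com/boompatron/algorithm | 프로그래머스/lv1/12982. 예산/예산.py | solution
-- ===== SOURCE A (Python) =====
-- import heapq
--
-- def solution(d, budget):
--     answer = 0
--     hq = []
--     for money in d:
--         heapq.heappush(hq, money)
--     while hq:
--         cur = heapq.heappop(hq)
--         budget -= cur
--         if budget >= 0:
--             answer += 1
--     return answer
-- ===== SOURCE B (Python) =====
-- def solution(d, budget):
--     answer = 0
--     total = sum(d)
--     for money in sorted(d, reverse=True):
--         if total <= budget:
--             answer += 1
--         total -= money
--     return answer
-- ===== Notes on version B (the rewrite author's own statement) =====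
-- stated objective: alternative
-- what changed: Instead of A's heap-based 'add cheapest items while the remaining budget stays nonnegative', B runs the dual greedy: it computes sum(d) once, walks the items in DESCENDING order removing the most expensive item each step, and counts the configurations whose total fits the budget; both count exactly the k-smallest-sums <= budget, so the results agree.
import Mathlib
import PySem

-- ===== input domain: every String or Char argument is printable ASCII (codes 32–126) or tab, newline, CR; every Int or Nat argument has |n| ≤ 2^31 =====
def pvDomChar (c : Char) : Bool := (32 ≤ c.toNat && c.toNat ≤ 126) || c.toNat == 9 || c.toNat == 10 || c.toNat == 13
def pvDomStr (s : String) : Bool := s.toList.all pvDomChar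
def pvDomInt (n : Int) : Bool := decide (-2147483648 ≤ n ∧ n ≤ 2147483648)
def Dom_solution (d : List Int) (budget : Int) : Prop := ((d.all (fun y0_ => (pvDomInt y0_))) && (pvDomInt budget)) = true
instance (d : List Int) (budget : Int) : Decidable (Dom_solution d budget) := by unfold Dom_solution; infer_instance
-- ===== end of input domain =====

-- B replaces A's heap greedy (add cheapest items while the remaining budget is nonnegative) with
-- the dual greedy: start from sum(d), drop the most expensive item each step (descending walk)
-- and count the configurations that fit the budget (objective: alternative, same cost).
-- A does not mutate d; only the return value is at stake.

-- ===== PORT A =====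
-- heapq is not in PySem, so it is ported by hand at the value level: the heap is the multiset of
-- its elements, heappush appends the item, heappop removes a least element. This is exact in the
-- sequence of popped VALUES (Python's binary-heap layout is unobservable in A's return value;
-- on ties any least element has the same value).
theorem pvFoldlMinMem (xs : List Int) : ∀ x : Int, xs.foldl min x ∈ x :: xs := by
  induction xs with
  | nil => intro x; simp
  | cons y ys ih =>
    intro x
    simp only [List.foldl, List.mem_cons]
    rcases List.mem_cons.mp (ih (min x y)) with h1 | h1
    · rcases min_choice x y with hc | hc
      · left; rw [h1, hc]
      · right; left; rw [h1, hc]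
    · right; right; exact h1

-- heappop on the nonempty heap x :: xs: returns (least element, remaining heap)
def pyHeappop (x : Int) (xs : List Int) : Int × List Int :=
  let m := xs.foldl min x
  (m, (x :: xs).erase m)

-- `while hq: cur = heappop(hq); budget -= cur; if budget >= 0: answer += 1`
def popLoop : List Int → Int → Int → Int
  | [], _, answer => answer
  | x :: xs, budget, answer =>
    let p := pyHeappop x xs
    let b2 := budget - p.1
    popLoop p.2 b2 (if 0 ≤ b2 then answer + 1 else answer)
termination_by hq _ _ => hq.length
decreasing_by
  simp only [pyHeappop]
  have := List.length_erase_of_mem (pvFoldlMinMem xs x)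
  simp_all

def solution (d : List Int) (budget : Int) : Int :=
  let hq := d.foldl (fun h money => h ++ [money]) []   -- the heappush loop
  popLoop hq budget 0

-- ===== PORT B =====
-- answer = 0; total = sum(d); for money in sorted(d, reverse=True): if total <= budget: answer += 1; total -= money
def solution_alt (d : List Int) (budget : Int) : Int :=
  ((PySem.List.sorted d (fun x => x) true).foldl
     (fun (st : Int × Int) money =>
        ((if st.2 ≤ budget then st.1 + 1 else st.1), st.2 - money))
     (0, d.foldl (· + ·) 0)).1

-- ===== PRECONDITION & SPEC =====
def Spec_solution (d : List Int) (budget : Int) (out : Int) : Prop := out = solution_alt d budget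
instance (d : List Int) (budget : Int) (out : Int) : Decidable (Spec_solution d budget out) := by unfold Spec_solution; infer_instance

-- ===== CLAIM (what is proved, stated in full; the proofs are below) =====
def Claim_equal_solution : Prop := ∀ (d : List Int) (budget : Int), Dom_solution d budget → Spec_solution d budget (solution d budget)

-- ===== LEMMAS AND PROOFS =====

-- ascending count: number of prefixes of l whose running subtraction from b stays ≥ 0
def pvCnt : List Int → Int → Int
  | [], _ => 0
  | m :: r, b => (if 0 ≤ b - m then 1 else 0) + pvCnt r (b - m)

-- descending count: number of positions of l whose running total (subtracting as we go) is ≤ B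
def pvCnt2 (B : Int) : List Int → Int → Int
  | [], _ => 0
  | m :: r, t => (if t ≤ B then 1 else 0) + pvCnt2 B r (t - m)

theorem pvFoldlMinLeInit (xs : List Int) : ∀ a : Int, xs.foldl min a ≤ a := by
  induction xs with
  | nil => intro a; simp
  | cons z zs ih =>
    intro a
    calc zs.foldl min (min a z) ≤ min a z := ih (min a z)
      _ ≤ a := min_le_left a z

theorem pvFoldlMinLe (xs : List Int) : ∀ x y : Int, y ∈ x :: xs → xs.foldl min x ≤ y := by
  induction xs with
  | nil => intro x y hy; simp at hy; simp [hy]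
  | cons z zs ih =>
    intro x y hy
    simp only [List.foldl]
    rcases List.mem_cons.mp hy with h1 | h1
    · rw [h1]
      calc zs.foldl min (min x z) ≤ min x z := pvFoldlMinLeInit zs (min x z)
        _ ≤ x := min_le_left x z
    · rcases List.mem_cons.mp h1 with h2 | h2
      · rw [h2]
        calc zs.foldl min (min x z) ≤ min x z := pvFoldlMinLeInit zs (min x z)
          _ ≤ z := min_le_right x z
      · exact ih (min x z) y (List.mem_cons.mpr (Or.inr h2))

-- sorted (x :: xs) = min :: sorted (rest after removing one min)
theorem pvSortedCons (x : Int) (xs : List Int) :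
    PySem.List.sorted (x :: xs) (fun a => a) false
      = xs.foldl min x :: PySem.List.sorted ((x :: xs).erase (xs.foldl min x)) (fun a => a) false := by
  set m := xs.foldl min x with hm
  have hmem : m ∈ x :: xs := pvFoldlMinMem xs x
  apply PySem.List.sorted_id_eq_of_perm_of_pairwise
  · exact ((PySem.List.sorted_perm _ _ _).cons m).trans (List.perm_cons_erase hmem).symm
  · refine List.pairwise_cons.mpr ⟨?_, ?_⟩
    · intro y hy
      have hy' : y ∈ (x :: xs).erase m :=
        (PySem.List.sorted_perm ((x :: xs).erase m) (fun a => a) false).mem_iff.mp hy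
      exact pvFoldlMinLe xs x y (List.mem_of_mem_erase hy')
    · exact PySem.List.sorted_pairwise _ _

theorem pvPopLoopEq (n : Nat) : ∀ hq : List Int, hq.length = n → ∀ b a : Int,
    popLoop hq b a = a + pvCnt (PySem.List.sorted hq (fun x => x) false) b := by
  induction n using Nat.strong_induction_on with
  | _ n ih =>
    intro hq hlen b a
    match hq, hlen with
    | [], _ =>
      have : PySem.List.sorted ([] : List Int) (fun x => x) false = [] :=
        (PySem.List.sorted_eq_nil_iff _ _ _).mpr rfl
      simp [popLoop, this, pvCnt]
    | x :: xs, hlen =>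
      rw [pvSortedCons]
      simp only [popLoop, pyHeappop]
      have hmem : xs.foldl min x ∈ x :: xs := pvFoldlMinMem xs x
      have hlt : ((x :: xs).erase (xs.foldl min x)).length < n := by
        rw [List.length_erase_of_mem hmem]
        simp at hlen ⊢
        omega
      rw [ih _ hlt _ rfl]
      simp only [pvCnt]
      split_ifs <;> ring

-- B's fold computes pvCnt2
theorem pvFoldlCnt2 (budget : Int) (l : List Int) : ∀ acc t : Int,
    (l.foldl (fun (st : Int × Int) money =>
        ((if st.2 ≤ budget then st.1 + 1 else st.1), st.2 - money)) (acc, t)).1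
      = acc + pvCnt2 budget l t := by
  induction l with
  | nil => intro acc t; simp [pvCnt2]
  | cons m r ih =>
    intro acc t
    simp only [List.foldl, pvCnt2]
    rw [ih]
    split_ifs <;> ring

theorem pvCnt2_append (B : Int) (xs : List Int) : ∀ ys t,
    pvCnt2 B (xs ++ ys) t = pvCnt2 B xs t + pvCnt2 B ys (t - xs.sum) := by
  induction xs with
  | nil => intro ys t; simp [pvCnt2]
  | cons m r ih =>
    intro ys t
    simp only [List.cons_append, pvCnt2, ih, List.sum_cons]
    have : t - m - r.sum = t - (m + r.sum) := by ring
    rw [this]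
    ring

theorem pvCnt2_shift (B c : Int) (l : List Int) : ∀ t,
    pvCnt2 B l t = pvCnt2 (B + c) l (t + c) := by
  induction l with
  | nil => intro t; simp [pvCnt2]
  | cons m r ih =>
    intro t
    simp only [pvCnt2]
    have h1 : t + c - m = (t - m) + c := by ring
    rw [h1, ← ih]
    split_ifs <;> omega

-- bridge: the descending walk starting at l.sum over l.reverse counts exactly pvCnt l B
theorem pvCnt2_reverse (l : List Int) : ∀ B : Int, pvCnt2 B l.reverse l.sum = pvCnt l B := by
  induction l with
  | nil => intro B; simp [pvCnt2, pvCnt]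
  | cons m r ih =>
    intro B
    have hrev : (m :: r).reverse = r.reverse ++ [m] := by simp
    rw [hrev, pvCnt2_append]
    have hsum : (m :: r).sum - r.reverse.sum = m := by simp
    rw [hsum]
    have h1 : pvCnt2 B r.reverse ((m :: r).sum) = pvCnt r (B - m) := by
      have hs : (m :: r).sum = r.sum + m := by simp; ring
      calc pvCnt2 B r.reverse ((m :: r).sum)
          = pvCnt2 ((B - m) + m) r.reverse (r.sum + m) := by rw [hs, sub_add_cancel]
        _ = pvCnt2 (B - m) r.reverse r.sum := (pvCnt2_shift (B - m) m r.reverse r.sum).symm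
        _ = pvCnt r (B - m) := ih (B - m)
    rw [h1]
    simp only [pvCnt2, pvCnt]
    split_ifs <;> omega

-- sorted(d, reverse=True) with the identity key is the reverse of sorted(d)
theorem pvSortedRevEq (d : List Int) :
    PySem.List.sorted d (fun x => x) true = (PySem.List.sorted d (fun x => x) false).reverse := by
  apply PySem.List.eq_of_perm_of_pairwise_le_of_injective (fun x : Int => -x) neg_injective
  · exact (PySem.List.sorted_perm d _ true).trans (PySem.List.sorted_perm d _ false).symm
      |>.trans (List.reverse_perm _).symm
  · exact (PySem.List.sorted_pairwise_rev d (fun x => x)).imp (by intro a b h; omega)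
  · have h := PySem.List.sorted_pairwise d (fun x => x)
    rw [List.pairwise_reverse]
    exact h.imp (by intro a b hh; omega)

theorem pvFoldlAddSum (l : List Int) : ∀ a : Int, l.foldl (· + ·) a = a + l.sum := by
  induction l with
  | nil => intro a; simp
  | cons m r ih => intro a; simp only [List.foldl, List.sum_cons]; rw [ih]; ring

-- ===== VERDICT (by name: the statement is the Claim_ definition above) =====
theorem solution_spec : Claim_equal_solution := by
  intro d budget _
  unfold Spec_solution solution solution_alt
  rw [PySem.List.foldl_append_singleton]
  simp only [List.nil_append]
  rw [pvPopLoopEq d.length d rfl, pvFoldlCnt2, pvSortedRevEq, pvFoldlAddSum]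
  have hsum : d.sum = (PySem.List.sorted d (fun x => x) false).sum :=
    ((PySem.List.sorted_perm d (fun x => x) false).sum_eq).symm
  simp only [zero_add]
  rw [hsum, pvCnt2_reverse]
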